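-- pv_equiv track=rewrite | github.com/mark-notifica/DataNavigator | catalog_export.py | _format_ddl_markdown
-- ===== SOURCE A (Python) =====
-- def _format_ddl_markdown(views, view_columns, view_map):
--     """Format as markdown documentation."""
--     output = []
--     output.append("# View DDL Export")
--     output.append("")
--     output.append("This document contains view definitions for AI analysis.")
--     output.append("")
--
--     current_server = None
--     current_db = None
--
--     for view in views:
--         qualified_name, view_name, description, ddl, schema, db, server = view
--
--         # Add server/database headers
--         if server != current_server:
--             output.append(f"# Server: {server}")
--             output.append("")
--             current_server = server
--             current_db = None
--
--         if db != current_db: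
--             output.append(f"## Database: {db}")
--             output.append("")
--             current_db = db
--
--         output.append(f"### {schema}.{view_name}")
--         output.append("")
--
--         if description:
--             output.append(f"**Description:** {description}")
--             output.append("")
--
--         output.append("**DDL:**")
--         output.append("```sql")
--         output.append(f"CREATE OR REPLACE VIEW {schema}.{view_name} AS")
--         output.append(ddl)
--         output.append("```")
--         output.append("")
--
--         # Add column table
--         if qualified_name in view_map:
--             node_id = view_map[qualified_name]
--             if node_id in view_columns and view_columns[node_id]:
--                 output.append("**Columns:**")
--                 output.append("")
--                 output.append("| Column | Type | Description |")
--                 output.append("|--------|------|-------------|")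
--                 for col in view_columns[node_id]:
--                     output.append(f"| {col['name']} | {col['type']} | {col['description']} |")
--                 output.append("")
--
--     return "\n".join(output)
-- ===== SOURCE B (Python) =====
-- def _group_runs(items, key):
--     """Split items into maximal runs of consecutive equal keys."""
--     if not items:
--         return []
--     k = key(items[0])
--     i = 1
--     while i < len(items) and key(items[i]) == k:
--         i += 1
--     return [(k, items[:i])] + _group_runs(items[i:], key)
--
--
-- def _view_block(view, view_columns, view_map):
--     """Markdown block for a single view (title, description, DDL, columns)."""
--     qualified_name, view_name, description, ddl, schema, db, server = view
--     lines = [f"### {schema}.{view_name}", ""]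
--     if description:
--         lines += [f"**Description:** {description}", ""]
--     lines += ["**DDL:**", "```sql",
--               f"CREATE OR REPLACE VIEW {schema}.{view_name} AS", ddl, "```", ""]
--     if qualified_name in view_map:
--         cols = view_columns.get(view_map[qualified_name])
--         if cols:
--             lines += ["**Columns:**", "",
--                       "| Column | Type | Description |",
--                       "|--------|------|-------------|"]
--             lines += [f"| {col['name']} | {col['type']} | {col['description']} |"
--                       for col in cols]
--             lines.append("")
--     return lines
--
--
-- def _format_ddl_markdown(views, view_columns, view_map):
--     """Format as markdown documentation."""
--     lines = ["# View DDL Export", "",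
--              "This document contains view definitions for AI analysis.", ""]
--     for server, server_views in _group_runs(views, lambda v: v[6]):
--         lines += [f"# Server: {server}", ""]
--         for db, db_views in _group_runs(server_views, lambda v: v[5]):
--             lines += [f"## Database: {db}", ""]
--             for view in db_views:
--                 lines += _view_block(view, view_columns, view_map)
--     return "\n".join(lines)
-- ===== Notes on version B (the rewrite author's own statement) =====
-- stated objective: alternative
-- what changed: Replaces the single stateful pass with mutable current_server/current_db sentinels by up-front run-grouping: views are split into maximal consecutive server runs and each run into consecutive db runs, and nested loops over these computed groups emit each header once per group while a per-view block helper emits each view's section; Pre_ excludes only inputs where a rendered column dict lacks a 'name'/'type'/'description' key, on which both A and B raise KeyError.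
import Mathlib
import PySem

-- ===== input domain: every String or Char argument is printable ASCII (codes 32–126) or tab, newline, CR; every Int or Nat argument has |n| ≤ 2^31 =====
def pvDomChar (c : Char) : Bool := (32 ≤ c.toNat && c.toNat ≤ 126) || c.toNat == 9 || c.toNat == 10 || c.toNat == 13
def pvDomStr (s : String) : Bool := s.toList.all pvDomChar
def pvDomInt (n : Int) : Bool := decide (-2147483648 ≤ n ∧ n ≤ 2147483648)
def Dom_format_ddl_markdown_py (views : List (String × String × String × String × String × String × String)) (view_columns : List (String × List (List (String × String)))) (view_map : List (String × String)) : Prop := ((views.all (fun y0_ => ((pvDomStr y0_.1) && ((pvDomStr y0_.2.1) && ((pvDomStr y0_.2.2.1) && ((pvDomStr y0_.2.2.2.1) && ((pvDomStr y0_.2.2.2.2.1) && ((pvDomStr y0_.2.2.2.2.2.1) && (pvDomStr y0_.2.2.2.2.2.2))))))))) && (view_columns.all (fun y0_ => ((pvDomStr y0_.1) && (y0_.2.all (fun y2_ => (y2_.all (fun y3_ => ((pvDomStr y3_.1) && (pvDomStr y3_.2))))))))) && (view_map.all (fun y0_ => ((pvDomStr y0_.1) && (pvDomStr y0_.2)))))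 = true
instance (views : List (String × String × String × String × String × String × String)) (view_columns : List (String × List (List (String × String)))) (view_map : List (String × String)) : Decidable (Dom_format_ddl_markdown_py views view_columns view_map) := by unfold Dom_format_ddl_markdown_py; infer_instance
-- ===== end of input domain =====

-- B regroups A's stateful single pass into nested loops over precomputed consecutive
-- server/db runs (same output; objective: alternative decomposition, not speed).
-- Pre_ excludes only inputs on which Python A raises KeyError (a rendered column dict
-- missing a 'name'/'type'/'description' key); B raises there too.

-- ===== PORT A =====
-- the column-row rendering of A's inner `for col in view_columns[node_id]` loop;
-- `.getD ""` marks the dict indexings col['name']/col['type']/col['description'],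
-- which raise KeyError in Python when absent — excluded by Pre_ below.
def fddlColRowA (col : List (String × String)) : String :=
  "| " ++ ((PySem.Dict.mk col).get? "name").getD "" ++ " | " ++
    ((PySem.Dict.mk col).get? "type").getD "" ++ " | " ++
    ((PySem.Dict.mk col).get? "description").getD "" ++ " |"

-- A's `for view in views:` loop, state = (output, current_server, current_db)
def fddlLoopA (vc : List (String × List (List (String × String)))) (vm : List (String × String)) :
    List (String × String × String × String × String × String × String) →
    List String → Option String → Option String → List String
  | [], output, _, _ => output
  | view :: rest, output, current_server, current_db =>
    -- qualified_name, view_name, description, ddl, schema, db, server = view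
    let server := view.2.2.2.2.2.2
    let db := view.2.2.2.2.2.1
    -- if server != current_server: append header, reset current_db
    let output1 := if some server ≠ current_server then
        output ++ ["# Server: " ++ server, ""] else output
    let current_db1 : Option String := if some server ≠ current_server then none else current_db
    -- if db != current_db:
    let output2 := if some db ≠ current_db1 then
        output1 ++ ["## Database: " ++ db, ""] else output1
    let current_db2 : Option String := if some db ≠ current_db1 then some db else current_db1
    let output3 := output2 ++ ["### " ++ view.2.2.2.2.1 ++ "." ++ view.2.1, ""]
    -- if description: (truthiness of a string = nonempty)
    let output4 := if view.2.2.1 ≠ "" then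
        output3 ++ ["**Description:** " ++ view.2.2.1, ""] else output3
    let output5 := output4 ++ ["**DDL:**", "```sql",
        "CREATE OR REPLACE VIEW " ++ view.2.2.2.2.1 ++ "." ++ view.2.1 ++ " AS",
        view.2.2.2.1, "```", ""]
    -- if qualified_name in view_map: node_id = view_map[qualified_name]; if node_id in view_columns and view_columns[node_id]:
    let output6 :=
      match (PySem.Dict.mk vm).get? view.1 with
      | none => output5
      | some node_id =>
        match (PySem.Dict.mk vc).get? node_id with
        | none => output5
        | some cols =>
          if cols ≠ [] then
            output5 ++ ["**Columns:**", "", "| Column | Type | Description |",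
                "|--------|------|-------------|"] ++ cols.map fddlColRowA ++ [""]
          else output5
    fddlLoopA vc vm rest output6
      (if some server ≠ current_server then some server else current_server) current_db2

def format_ddl_markdown_py (views : List (String × String × String × String × String × String × String)) (view_columns : List (String × List (List (String × String)))) (view_map : List (String × String)) : String :=
  PySem.Str.join "\n"
    (fddlLoopA view_columns view_map views
      ["# View DDL Export", "", "This document contains view definitions for AI analysis.", ""]
      none none)

-- ===== PORT B =====
-- Source B's _group_runs: maximal runs of consecutive equal keys (items[:i] / items[i:])
def fddlGroupRuns {α : Type} (key : α → String) : List α → List (String × List α)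
  | [] => []
  | x :: xs =>
    (key x, x :: xs.takeWhile (fun y => key y == key x)) ::
      fddlGroupRuns key (xs.dropWhile (fun y => key y == key x))
termination_by l => l.length
decreasing_by
  have := List.length_dropWhile_le (fun y => key y == key x) xs
  simp only [List.length_cons]; omega

-- the f-string of Source B's column-row list comprehension
def fddlColRowB (col : List (String × String)) : String :=
  "| " ++ ((PySem.Dict.mk col).get? "name").getD "" ++ " | " ++
    ((PySem.Dict.mk col).get? "type").getD "" ++ " | " ++
    ((PySem.Dict.mk col).get? "description").getD "" ++ " |"

-- Source B's _view_block
def fddlViewBlock (vc : List (String × List (List (String × String)))) (vm : List (String × String))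
    (view : String × String × String × String × String × String × String) : List String :=
  ["### " ++ view.2.2.2.2.1 ++ "." ++ view.2.1, ""] ++
  (if view.2.2.1 ≠ "" then ["**Description:** " ++ view.2.2.1, ""] else []) ++
  ["**DDL:**", "```sql",
    "CREATE OR REPLACE VIEW " ++ view.2.2.2.2.1 ++ "." ++ view.2.1 ++ " AS",
    view.2.2.2.1, "```", ""] ++
  (match (PySem.Dict.mk vm).get? view.1 with
   | none => []
   | some node_id =>
     match (PySem.Dict.mk vc).get? node_id with
     | none => []
     | some cols =>
       if cols ≠ [] then
         ["**Columns:**", "", "| Column | Type | Description |",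
          "|--------|------|-------------|"] ++ cols.map fddlColRowB ++ [""]
       else [])

-- Source B's inner `for db, db_views in _group_runs(server_views, ...)` loop
def fddlRenderDbs (vc : List (String × List (List (String × String)))) (vm : List (String × String))
    (g : List (String × String × String × String × String × String × String)) : List String :=
  (fddlGroupRuns (fun v => v.2.2.2.2.2.1) g).flatMap
    (fun p => ["## Database: " ++ p.1, ""] ++ p.2.flatMap (fddlViewBlock vc vm))

def format_ddl_markdown_py_alt (views : List (String × String × String × String × String × String × String)) (view_columns : List (String × List (List (String × String)))) (view_map : List (String × String)) : String :=
  PySem.Str.join "\n"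
    (["# View DDL Export", "", "This document contains view definitions for AI analysis.", ""] ++
      (fddlGroupRuns (fun v => v.2.2.2.2.2.2) views).flatMap
        (fun p => ["# Server: " ++ p.1, ""] ++ fddlRenderDbs view_columns view_map p.2))

-- ===== PRECONDITION & SPEC =====
-- Pre_ excludes exactly the inputs where Python A raises KeyError: some column dict
-- that is actually rendered (reached via view_map and a non-empty view_columns entry)
-- lacks a "name", "type" or "description" key.
def Pre_format_ddl_markdown_py (views : List (String × String × String × String × String × String × String)) (view_columns : List (String × List (List (String × String)))) (view_map : List (String × String)) : Prop :=
  (views.all (fun v =>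
    match (PySem.Dict.mk view_map).get? v.1 with
    | none => true
    | some node_id =>
      match (PySem.Dict.mk view_columns).get? node_id with
      | none => true
      | some cols => cols.all (fun col =>
          (PySem.Dict.mk col).contains "name" &&
          (PySem.Dict.mk col).contains "type" &&
          (PySem.Dict.mk col).contains "description"))) = true
instance (views : List (String × String × String × String × String × String × String)) (view_columns : List (String × List (List (String × String)))) (view_map : List (String × String)) : Decidable (Pre_format_ddl_markdown_py views view_columns view_map) := by unfold Pre_format_ddl_markdown_py; infer_instance

def pvWitness_format_ddl_markdown_py : (List (String × String × String × String × String × String × String)) × (List (String × List (List (String × String)))) × (List (String × String)) :=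
  ([("s1.db1.v1", "v1", "demo view", "SELECT 1", "s1", "db1", "srvA")],
   [("n1", [[("name", "c"), ("type", "int"), ("description", "col")]])],
   [("s1.db1.v1", "n1")])

def Spec_format_ddl_markdown_py (views : List (String × String × String × String × String × String × String)) (view_columns : List (String × List (List (String × String)))) (view_map : List (String × String)) (out : String) : Prop := out = format_ddl_markdown_py_alt views view_columns view_map
instance (views : List (String × String × String × String × String × String × String)) (view_columns : List (String × List (List (String × String)))) (view_map : List (String × String)) (out : String) : Decidable (Spec_format_ddl_markdown_py views view_columns view_map out) := by unfold Spec_format_ddl_markdown_py; infer_instance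

-- ===== CLAIM (what is proved, stated in full; the proofs are below) =====
def Claim_equal_format_ddl_markdown_py : Prop := ∀ (views : List (String × String × String × String × String × String × String)) (view_columns : List (String × List (List (String × String)))) (view_map : List (String × String)), Dom_format_ddl_markdown_py views view_columns view_map → Pre_format_ddl_markdown_py views view_columns view_map → Spec_format_ddl_markdown_py views view_columns view_map (format_ddl_markdown_py views view_columns view_map)

-- ===== LEMMAS AND PROOFS =====

theorem fddl_witness_ok :
    Dom_format_ddl_markdown_py pvWitness_format_ddl_markdown_py.1 pvWitness_format_ddl_markdown_py.2.1 pvWitness_format_ddl_markdown_py.2.2 ∧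
    Pre_format_ddl_markdown_py pvWitness_format_ddl_markdown_py.1 pvWitness_format_ddl_markdown_py.2.1 pvWitness_format_ddl_markdown_py.2.2 := by
  constructor <;> decide

-- A's and B's per-view emissions agree: A's chained conditional appends after the
-- headers are `output ++ fddlViewBlock`.
theorem fddl_block_eq (vc : List (String × List (List (String × String)))) (vm : List (String × String))
    (view : String × String × String × String × String × String × String) (output : List String) :
    (let output3 := output ++ ["### " ++ view.2.2.2.2.1 ++ "." ++ view.2.1, ""]
     let output4 := if view.2.2.1 ≠ "" then
         output3 ++ ["**Description:** " ++ view.2.2.1, ""] else output3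
     let output5 := output4 ++ ["**DDL:**", "```sql",
         "CREATE OR REPLACE VIEW " ++ view.2.2.2.2.1 ++ "." ++ view.2.1 ++ " AS",
         view.2.2.2.1, "```", ""]
     match (PySem.Dict.mk vm).get? view.1 with
     | none => output5
     | some node_id =>
       match (PySem.Dict.mk vc).get? node_id with
       | none => output5
       | some cols =>
         if cols ≠ [] then
           output5 ++ ["**Columns:**", "", "| Column | Type | Description |",
               "|--------|------|-------------|"] ++ cols.map fddlColRowA ++ [""]
         else output5) = output ++ fddlViewBlock vc vm view := by
  simp only [fddlViewBlock]
  rw [show fddlColRowB = fddlColRowA from rfl]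
  rcases hm : (PySem.Dict.mk vm).get? view.1 with _ | nid
  · split_ifs <;> simp
  · rcases hc : (PySem.Dict.mk vc).get? nid with _ | cols
    · split_ifs <;> simp [hc]
    · by_cases hcols : cols = []
      · split_ifs <;> simp [hc, hcols]
      · split_ifs <;> simp [hc, hcols]

-- step lemma, fresh server (current_server ≠ this view's server)
theorem fddlLoopA_step_fresh (vc : List (String × List (List (String × String)))) (vm : List (String × String))
    (view : String × String × String × String × String × String × String)
    (rest : List (String × String × String × String × String × String × String))
    (output : List String) (cs cd : Option String) (h : some view.2.2.2.2.2.2 ≠ cs) :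
    fddlLoopA vc vm (view :: rest) output cs cd =
      fddlLoopA vc vm rest
        (output ++ ["# Server: " ++ view.2.2.2.2.2.2, ""] ++
          ["## Database: " ++ view.2.2.2.2.2.1, ""] ++ fddlViewBlock vc vm view)
        (some view.2.2.2.2.2.2) (some view.2.2.2.2.2.1) := by
  rw [fddlLoopA]
  simp only [if_pos h, if_pos (by simp : some view.2.2.2.2.2.1 ≠ (none : Option String))]
  rw [fddl_block_eq vc vm view]

-- step lemma, same server, new db
theorem fddlLoopA_step_db (vc : List (String × List (List (String × String)))) (vm : List (String × String))
    (view : String × String × String × String × String × String × String)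
    (rest : List (String × String × String × String × String × String × String))
    (output : List String) (cd : Option String)
    (h : some view.2.2.2.2.2.1 ≠ cd) :
    fddlLoopA vc vm (view :: rest) output (some view.2.2.2.2.2.2) cd =
      fddlLoopA vc vm rest
        (output ++ ["## Database: " ++ view.2.2.2.2.2.1, ""] ++ fddlViewBlock vc vm view)
        (some view.2.2.2.2.2.2) (some view.2.2.2.2.2.1) := by
  rw [fddlLoopA]
  simp only [if_neg (by simp : ¬ some view.2.2.2.2.2.2 ≠ some view.2.2.2.2.2.2), if_pos h]
  rw [fddl_block_eq vc vm view]

-- step lemma, same server, same db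
theorem fddlLoopA_step_same (vc : List (String × List (List (String × String)))) (vm : List (String × String))
    (view : String × String × String × String × String × String × String)
    (rest : List (String × String × String × String × String × String × String))
    (output : List String) :
    fddlLoopA vc vm (view :: rest) output (some view.2.2.2.2.2.2) (some view.2.2.2.2.2.1) =
      fddlLoopA vc vm rest (output ++ fddlViewBlock vc vm view)
        (some view.2.2.2.2.2.2) (some view.2.2.2.2.2.1) := by
  rw [fddlLoopA]
  simp only [if_neg (by simp : ¬ some view.2.2.2.2.2.2 ≠ some view.2.2.2.2.2.2),
    if_neg (by simp : ¬ some view.2.2.2.2.2.1 ≠ some view.2.2.2.2.2.1)]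
  rw [fddl_block_eq vc vm view]

-- accumulator lemma
theorem fddlLoopA_acc (vc : List (String × List (List (String × String)))) (vm : List (String × String))
    (vs : List (String × String × String × String × String × String × String)) :
    ∀ (output : List String) (cs cd : Option String),
      fddlLoopA vc vm vs output cs cd = output ++ fddlLoopA vc vm vs [] cs cd := by
  induction vs with
  | nil => intro output cs cd; simp [fddlLoopA]
  | cons v rest ih =>
    intro output cs cd
    by_cases hs : some v.2.2.2.2.2.2 ≠ cs
    · rw [fddlLoopA_step_fresh vc vm v rest _ _ _ hs,
        fddlLoopA_step_fresh vc vm v rest [] cs cd hs, ih]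
      conv_rhs => rw [ih]
      simp
    · rw [not_ne_iff] at hs
      subst hs
      by_cases hd : some v.2.2.2.2.2.1 ≠ cd
      · rw [fddlLoopA_step_db vc vm v rest _ _ hd, fddlLoopA_step_db vc vm v rest [] _ hd, ih]
        conv_rhs => rw [ih]
        simp
      · rw [not_ne_iff] at hd
        subst hd
        rw [fddlLoopA_step_same, fddlLoopA_step_same vc vm v rest [], ih]
        conv_rhs => rw [ih]
        simp

-- B-side continuation of a db run already opened with key d
def fddlDbCont (vc : List (String × List (List (String × String)))) (vm : List (String × String))
    (d : String) (run : List (String × String × String × String × String × String × String)) : List String :=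
  (run.takeWhile (fun y => y.2.2.2.2.2.1 == d)).flatMap (fddlViewBlock vc vm) ++
    fddlRenderDbs vc vm (run.dropWhile (fun y => y.2.2.2.2.2.1 == d))

def fddlRenderServers (vc : List (String × List (List (String × String)))) (vm : List (String × String))
    (vs : List (String × String × String × String × String × String × String)) : List String :=
  (fddlGroupRuns (fun v => v.2.2.2.2.2.2) vs).flatMap
    (fun p => ["# Server: " ++ p.1, ""] ++ fddlRenderDbs vc vm p.2)

-- core: A's loop from a state "inside server s, inside db d, nothing pending"
-- equals B's continuation rendering
theorem fddl_cont (vc : List (String × List (List (String × String)))) (vm : List (String × String)) :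
    ∀ (n : ℕ) (rest : List (String × String × String × String × String × String × String)),
      rest.length ≤ n → ∀ (s d : String),
      fddlLoopA vc vm rest [] (some s) (some d) =
        fddlDbCont vc vm d (rest.takeWhile (fun y => y.2.2.2.2.2.2 == s)) ++
          fddlRenderServers vc vm (rest.dropWhile (fun y => y.2.2.2.2.2.2 == s)) := by
  intro n
  induction n with
  | zero =>
    intro rest hlen s d
    have : rest = [] := List.length_eq_zero_iff.mp (Nat.le_zero.mp hlen)
    subst this
    simp [fddlLoopA, fddlDbCont, fddlRenderDbs, fddlRenderServers, fddlGroupRuns]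
  | succ n ih =>
    intro rest hlen s d
    cases rest with
    | nil => simp [fddlLoopA, fddlDbCont, fddlRenderDbs, fddlRenderServers, fddlGroupRuns]
    | cons w rest' =>
      simp only [List.length_cons, Nat.succ_le_succ_iff] at hlen
      by_cases hs : w.2.2.2.2.2.2 = s
      · -- same server
        by_cases hd : w.2.2.2.2.2.1 = d
        · -- same db: w joins the current db run
          subst hs; subst hd
          rw [fddlLoopA_step_same vc vm w rest' [], fddlLoopA_acc,
            ih rest' hlen w.2.2.2.2.2.2 w.2.2.2.2.2.1]
          rw [List.takeWhile_cons_of_pos (by simp),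
            List.dropWhile_cons_of_pos (by simp)]
          simp only [fddlDbCont]
          rw [List.takeWhile_cons_of_pos (by simp),
            List.dropWhile_cons_of_pos (by simp)]
          simp [List.append_assoc]
        · -- new db within the same server: a new db run opens at w
          subst hs
          rw [fddlLoopA_step_db vc vm w rest' [] (some d) (by simpa using hd),
            fddlLoopA_acc, ih rest' hlen w.2.2.2.2.2.2 w.2.2.2.2.2.1]
          rw [List.takeWhile_cons_of_pos (by simp),
            List.dropWhile_cons_of_pos (by simp)]
          simp only [fddlDbCont]
          rw [List.takeWhile_cons_of_neg (by simp [hd]),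
            List.dropWhile_cons_of_neg (by simp [hd])]
          simp [fddlRenderDbs, fddlGroupRuns, List.append_assoc]
      · -- new server: a new server run (and db run) opens at w
        rw [fddlLoopA_step_fresh vc vm w rest' [] (some s) (some d) (by simpa using hs),
          fddlLoopA_acc, ih rest' hlen w.2.2.2.2.2.2 w.2.2.2.2.2.1]
        rw [List.takeWhile_cons_of_neg (by simp [hs]),
          List.dropWhile_cons_of_neg (by simp [hs])]
        simp only [fddlDbCont, List.takeWhile_nil, List.dropWhile_nil, List.flatMap_nil,
          List.nil_append, fddlRenderServers, fddlGroupRuns, List.flatMap_cons]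
        simp [fddlRenderDbs, fddlGroupRuns, List.append_assoc]

theorem fddl_main (vc : List (String × List (List (String × String)))) (vm : List (String × String))
    (vs : List (String × String × String × String × String × String × String)) :
    fddlLoopA vc vm vs [] none none = fddlRenderServers vc vm vs := by
  cases vs with
  | nil => simp [fddlLoopA, fddlRenderServers, fddlGroupRuns]
  | cons v rest =>
    rw [fddlLoopA_step_fresh vc vm v rest [] none none (by simp), fddlLoopA_acc,
      fddl_cont vc vm rest.length rest le_rfl v.2.2.2.2.2.2 v.2.2.2.2.2.1]
    simp only [fddlRenderServers, fddlGroupRuns, List.flatMap_cons]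
    simp only [fddlRenderDbs, fddlGroupRuns, List.flatMap_cons, List.nil_append]
    simp [fddlDbCont, fddlRenderDbs, List.append_assoc]

-- ===== VERDICT (by name: the statement is the Claim_ definition above) =====
theorem format_ddl_markdown_py_spec : Claim_equal_format_ddl_markdown_py := by
  intro views vc vm _ _
  unfold Spec_format_ddl_markdown_py format_ddl_markdown_py format_ddl_markdown_py_alt
  rw [fddlLoopA_acc, fddl_main]
  rfl
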